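-- pv_equiv track=rewrite | github.com/MrHamdulay/csc3-capstone | examples/data/Assignment_9/vrntim001/question3.py | check1_9
-- ===== SOURCE A (Python) =====
-- def check1_9(array):
--     for i in range(1,10):
--         try:
--             array.remove(str(i))
--         except ValueError:
--             continue
--     if len(array) > 0:
--         return False
--     else:
--         return True
-- ===== SOURCE B (Python) =====
-- _DIGITS = frozenset(str(i) for i in range(1, 10))
--
-- def check1_9(array):
--     # one pass: drop the first occurrence of each digit-string '1'..'9',
--     # keep everything else; same in-place mutation as A, same return value
--     seen = set()
--     result = []
--     for x in array:
--         if x in _DIGITS and x not in seen: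
--             seen.add(x)
--         else:
--             result.append(x)
--     array[:] = result
--     return len(result) == 0
-- ===== Notes on version B (the rewrite author's own statement) =====
-- stated objective: alternative
-- what changed: Replaces nine list.remove scans (one per digit) with a single traversal that skips the first occurrence of each digit '1'..'9' using a seen-set, then tests emptiness.
import Mathlib
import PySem

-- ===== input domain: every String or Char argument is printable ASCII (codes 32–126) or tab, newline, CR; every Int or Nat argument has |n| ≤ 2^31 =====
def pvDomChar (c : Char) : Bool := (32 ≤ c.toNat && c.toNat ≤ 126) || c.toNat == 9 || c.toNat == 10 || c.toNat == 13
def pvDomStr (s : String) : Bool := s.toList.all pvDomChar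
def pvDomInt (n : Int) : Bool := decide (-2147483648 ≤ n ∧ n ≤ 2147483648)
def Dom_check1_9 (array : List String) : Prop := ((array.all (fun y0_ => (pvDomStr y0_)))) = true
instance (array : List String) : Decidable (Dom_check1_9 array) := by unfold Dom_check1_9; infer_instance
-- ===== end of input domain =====

-- B replaces A's nine remove-scans by one pass with a seen-set; equivalence proved for the
-- RETURN value only (both mutate the caller's list in Python; B performs the same mutation).

-- ===== PORT A =====
-- for i in range(1,10): try array.remove(str(i)) except ValueError: continue
def check1_9 (array : List String) : Bool :=
  let arr := (PySem.List.pyRange 1 10 1).foldl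
    (fun l i =>
      match PySem.List.remove? l (PySem.Int.toStr i) with
      | some l' => l'
      | none => l) array
  if arr.length > 0 then false else true

-- ===== PORT B =====
def pvDigits : List String := ["1", "2", "3", "4", "5", "6", "7", "8", "9"]

def check1_9AltGo : List String → PySem.Set String → List String
  | [], _ => []
  | x :: xs, seen =>
    if pvDigits.contains x && !(PySem.Set.contains seen x) then
      check1_9AltGo xs (PySem.Set.add seen x)
    else
      x :: check1_9AltGo xs seen

def check1_9_alt (array : List String) : Bool :=
  let result := check1_9AltGo array PySem.Set.empty
  decide (result.length = 0)

-- ===== PRECONDITION & SPEC =====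
def Spec_check1_9 (array : List String) (out : Bool) : Prop := out = check1_9_alt array
instance (array : List String) (out : Bool) : Decidable (Spec_check1_9 array out) := by unfold Spec_check1_9; infer_instance

-- ===== CLAIM (what is proved, stated in full; the proofs are below) =====
def Claim_equal_check1_9 : Prop := ∀ (array : List String), Dom_check1_9 array → Spec_check1_9 array (check1_9 array)

-- ===== LEMMAS AND PROOFS =====

-- A's per-digit step is List.erase (remove? removes the first occurrence; a miss keeps l)
theorem pvStep_eq_erase (l : List String) (v : String) :
    (match PySem.List.remove? l v with
      | some l' => l'
      | none => l) = l.erase v := by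
  by_cases h : v ∈ l
  · rw [PySem.List.remove?_eq_some_erase l v h]
  · rw [(PySem.List.remove?_eq_none_iff l v).mpr h, List.erase_of_not_mem h]

-- the A-side fold empties l iff l is duplicate-free and contained in the (duplicate-free) digit list
theorem pvFoldErase_eq_nil (ds : List String) (hds : ds.Nodup) :
    ∀ l : List String, ds.foldl List.erase l = [] ↔ l.Nodup ∧ ∀ x ∈ l, x ∈ ds := by
  induction ds with
  | nil =>
    intro l
    simp only [List.foldl_nil, List.not_mem_nil]
    constructor
    · rintro rfl; simp
    · rintro ⟨_, h⟩
      cases l with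
      | nil => rfl
      | cons a t => exact (h a (by simp)).elim
  | cons d ds ih =>
    intro l
    have hd : d ∉ ds := (List.nodup_cons.mp hds).1
    have hds' : ds.Nodup := (List.nodup_cons.mp hds).2
    rw [List.foldl_cons, ih hds' (l.erase d)]
    constructor
    · rintro ⟨h1, h2⟩
      constructor
      · rw [List.nodup_iff_count_le_one]
        intro a
        by_cases ha : a = d
        · subst ha
          by_contra hgt
          rw [not_le] at hgt
          have hmem : a ∈ l.erase a := by
            rw [← List.count_pos_iff, List.count_erase_self]
            omega
          exact hd (h2 a hmem)
        · have := List.nodup_iff_count_le_one.mp h1 a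
          rwa [List.count_erase_of_ne ha] at this
      · intro x hx
        by_cases hxd : x = d
        · simp [hxd]
        · exact List.mem_cons_of_mem _ (h2 x ((List.mem_erase_of_ne hxd).mpr hx))
    · rintro ⟨h1, h2⟩
      refine ⟨h1.erase d, ?_⟩
      intro x hx
      have hxd : x ≠ d ∧ x ∈ l := (h1.mem_erase_iff).mp hx
      have := h2 x hxd.2
      rcases List.mem_cons.mp this with h | h
      · exact absurd h hxd.1
      · exact h

-- the B-side pass yields [] iff every element is a fresh digit
theorem pvGo_eq_nil (xs : List String) :
    ∀ s : PySem.Set String,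
      check1_9AltGo xs s = [] ↔ xs.Nodup ∧ ∀ x ∈ xs, x ∈ pvDigits ∧ x ∉ s := by
  induction xs with
  | nil => intro s; simp [check1_9AltGo]
  | cons x xs ih =>
    intro s
    by_cases hc : x ∈ pvDigits ∧ x ∉ s
    · have hb : (pvDigits.contains x && !(PySem.Set.contains s x)) = true := by
        simp only [PySem.Set.contains_eq_listContains, Bool.and_eq_true, Bool.not_eq_true',
          List.contains_eq_mem, decide_eq_true_eq, decide_eq_false_iff_not]
        exact hc
      rw [check1_9AltGo, if_pos hb, ih (PySem.Set.add s x)]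
      constructor
      · rintro ⟨h1, h2⟩
        refine ⟨List.nodup_cons.mpr ⟨?_, h1⟩, ?_⟩
        · intro hmem
          exact (h2 x hmem).2 ((PySem.Set.mem_add s x x).mpr (Or.inr rfl))
        · intro y hy
          rcases List.mem_cons.mp hy with rfl | hy'
          · exact hc
          · have := h2 y hy'
            exact ⟨this.1, fun hys => this.2 ((PySem.Set.mem_add s x y).mpr (Or.inl hys))⟩
      · rintro ⟨h1, h2⟩
        have hnx : x ∉ xs := (List.nodup_cons.mp h1).1
        refine ⟨(List.nodup_cons.mp h1).2, ?_⟩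
        intro y hy
        have := h2 y (List.mem_cons_of_mem _ hy)
        refine ⟨this.1, ?_⟩
        intro hmem
        rcases (PySem.Set.mem_add s x y).mp hmem with hys | rfl
        · exact this.2 hys
        · exact hnx hy
    · have hb : ¬ ((pvDigits.contains x && !(PySem.Set.contains s x)) = true) := by
        simp only [PySem.Set.contains_eq_listContains, Bool.and_eq_true, Bool.not_eq_true',
          List.contains_eq_mem, decide_eq_true_eq, decide_eq_false_iff_not]
        exact hc
      rw [check1_9AltGo, if_neg hb]
      constructor
      · intro h; exact absurd h (by simp)
      · rintro ⟨_, h2⟩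
        exact absurd ⟨(h2 x (by simp)).1, (h2 x (by simp)).2⟩ hc

-- the digit list A iterates over, evaluated
theorem pvRange_digits :
    (PySem.List.pyRange 1 10 1).map PySem.Int.toStr = pvDigits := by decide

-- ===== VERDICT (by name: the statement is the Claim_ definition above) =====
theorem check1_9_spec : Claim_equal_check1_9 := by
  intro array _
  unfold Spec_check1_9 check1_9 check1_9_alt
  have hA : (PySem.List.pyRange 1 10 1).foldl
      (fun l i =>
        match PySem.List.remove? l (PySem.Int.toStr i) with
        | some l' => l'
        | none => l) array
      = pvDigits.foldl List.erase array := by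
    rw [← pvRange_digits, List.foldl_map]
    congr 1
    funext l i
    exact pvStep_eq_erase l (PySem.Int.toStr i)
  rw [Bool.eq_iff_iff]
  simp only [hA]
  have hAiff := pvFoldErase_eq_nil pvDigits (by decide) array
  have hBiff := pvGo_eq_nil array PySem.Set.empty
  constructor
  · intro h
    split at h
    · exact absurd h (by simp)
    · rename_i hlen
      have hnil : pvDigits.foldl List.erase array = [] :=
        List.length_eq_zero_iff.mp (by omega)
      have hP := hAiff.mp hnil
      have hB : check1_9AltGo array PySem.Set.empty = [] :=
        hBiff.mpr ⟨hP.1, fun x hx => ⟨hP.2 x hx, by simp [PySem.Set.empty]⟩⟩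
      simp only [hB]
      simp
  · intro h
    simp only [decide_eq_true_eq] at h
    have hBnil : check1_9AltGo array PySem.Set.empty = [] := List.length_eq_zero_iff.mp h
    have hP := hBiff.mp hBnil
    have hAnil : pvDigits.foldl List.erase array = [] :=
      hAiff.mpr ⟨hP.1, fun x hx => (hP.2 x hx).1⟩
    simp [hAnil]
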